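-- pv_equiv track=rewrite | github.com/malgohip/PortafolioMalgo | Intro CC/Ejercicios Code Abey/Me quedó grande muchachos/277 The Adventure of Morse Code.py | find_matching_text
-- ===== SOURCE A (Python) =====
-- def find_matching_text(reference_text, decoded_message):
--     """Find the sequence of words in the reference text that matches the decoded message."""
--     words = reference_text.split()
--     decoded_message = decoded_message.strip()
--
--     for i in range(len(words)):
--         for j in range(i + 10, min(i + 13, len(words)) + 1):
--             candidate = ' '.join(words[i:j])
--             if candidate == decoded_message:
--                 return candidate
--
--     return 'No match found'
-- ===== SOURCE B (Python) =====
-- def find_matching_text(reference_text, decoded_message):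
--     """Find the sequence of words in the reference text that matches the decoded message."""
--     words = reference_text.split()
--     target = decoded_message.strip()
--     m = len(target)
--     # prefix[k] = len(' '.join(words[:k])) + 1 (total length of the first k words with
--     # one separator each); a window words[s:s+L] can only join to target when
--     # prefix[s+L] - prefix[s] - 1 == m, so the join is built for those windows only.
--     total = 0
--     prefix = [0]
--     for w in words:
--         total += len(w) + 1
--         prefix.append(total)
--     for length in range(10, 14):
--         for start in range(len(words) - length + 1):
--             if prefix[start + length] - prefix[start] - 1 == m and \
--                ' '.join(words[start:start + length]) == target:
--                 return target
--     return 'No match found'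
-- ===== Notes on version B (the rewrite author's own statement) =====
-- stated objective: alternative
-- what changed: B precomputes a prefix-sum array of word lengths and iterates window lengths 10-13 outermost, building the space-joined candidate only for windows whose precomputed total length already equals the message length, instead of A's start-major nested scan that joins every window; any matching window necessarily equals the message, so the returned value is identical.
import Mathlib
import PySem

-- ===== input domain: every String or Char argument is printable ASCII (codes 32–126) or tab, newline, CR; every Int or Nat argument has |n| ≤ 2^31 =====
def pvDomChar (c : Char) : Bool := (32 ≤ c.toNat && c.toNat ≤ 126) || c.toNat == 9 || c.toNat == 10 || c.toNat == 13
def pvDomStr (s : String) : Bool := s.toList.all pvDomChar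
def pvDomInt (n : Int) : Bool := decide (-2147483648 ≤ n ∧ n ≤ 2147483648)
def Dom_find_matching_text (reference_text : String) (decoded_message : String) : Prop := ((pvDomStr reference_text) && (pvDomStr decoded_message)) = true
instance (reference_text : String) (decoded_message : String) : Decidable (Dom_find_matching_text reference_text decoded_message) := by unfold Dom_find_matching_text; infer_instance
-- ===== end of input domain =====

-- B replaces A's start-major nested window search by a prefix-sum length fingerprint:
-- joins are built only for windows whose total length already matches the message
-- (objective: alternative algorithm; same return value everywhere).


-- ===== PORT A =====
-- inner loop: for j in range(i+10, min(i+13, len(words)) + 1): …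
def pvAInner (words : List String) (msg : String) (i : Int) : List Int → Option String
  | [] => none
  | j :: js =>
    let candidate := PySem.Str.join " " (PySem.List.slice words (some i) (some j))
    if candidate == msg then some candidate else pvAInner words msg i js

-- outer loop: for i in range(len(words)): …
def pvAOuter (words : List String) (msg : String) : List Int → Option String
  | [] => none
  | i :: is =>
    match pvAInner words msg i (PySem.List.pyRange (i + 10) (min (i + 13) (words.length : Int) + 1) 1) with
    | some c => some c
    | none => pvAOuter words msg is

def find_matching_text (reference_text : String) (decoded_message : String) : String :=
  let words := PySem.Str.split₀ reference_text
  let msg := PySem.Str.strip decoded_message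
  (pvAOuter words msg (PySem.List.pyRange 0 (words.length : Int) 1)).getD "No match found"

-- ===== PORT B =====
-- inner loop: for start in range(len(words) - length + 1): …
-- (prefix[start + length] / prefix[start]: both indices are always in range, so
--  pyGet? always returns some; .getD 0 only discharges the Option)
def pvBScan (words : List String) (target : String) (pre : List Int) (m : Int) (L : Int) : List Int → Option String
  | [] => none
  | s :: ss =>
    if ((PySem.List.pyGet? pre (s + L)).getD 0 - (PySem.List.pyGet? pre s).getD 0 - 1 == m)
        && (PySem.Str.join " " (PySem.List.slice words (some s) (some (s + L))) == target) then
      some target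
    else pvBScan words target pre m L ss

-- outer loop: for length in range(10, 14): …
def pvBLen (words : List String) (target : String) (pre : List Int) (m : Int) : List Int → Option String
  | [] => none
  | L :: Ls =>
    match pvBScan words target pre m L (PySem.List.pyRange 0 ((words.length : Int) - L + 1) 1) with
    | some c => some c
    | none => pvBLen words target pre m Ls

def find_matching_text_alt (reference_text : String) (decoded_message : String) : String :=
  let words := PySem.Str.split₀ reference_text
  let target := PySem.Str.strip decoded_message
  let m := PySem.Str.len target
  -- total = 0; prefix = [0]; for w in words: total += len(w) + 1; prefix.append(total)
  let tp := words.foldl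
    (fun (p : Int × List Int) w => (p.1 + PySem.Str.len w + 1, p.2 ++ [p.1 + PySem.Str.len w + 1]))
    (0, [0])
  (pvBLen words target tp.2 m (PySem.List.pyRange 10 14 1)).getD "No match found"

-- ===== PRECONDITION & SPEC =====
def Spec_find_matching_text (reference_text : String) (decoded_message : String) (out : String) : Prop := out = find_matching_text_alt reference_text decoded_message
instance (reference_text : String) (decoded_message : String) (out : String) : Decidable (Spec_find_matching_text reference_text decoded_message out) := by unfold Spec_find_matching_text; infer_instance

-- ===== CLAIM (what is proved, stated in full; the proofs are below) =====
def Claim_equal_find_matching_text : Prop := ∀ (reference_text : String) (decoded_message : String), Dom_find_matching_text reference_text decoded_message → Spec_find_matching_text reference_text decoded_message (find_matching_text reference_text decoded_message)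

-- ===== LEMMAS AND PROOFS =====

-- the window-match test both programs share
def pvC (words : List String) (msg : String) (i j : Int) : Bool :=
  PySem.Str.join " " (PySem.List.slice words (some i) (some j)) == msg

-- B's prefix-sum fingerprint test
def pvP (pre : List Int) (m : Int) (s L : Int) : Bool :=
  (PySem.List.pyGet? pre (s + L)).getD 0 - (PySem.List.pyGet? pre s).getD 0 - 1 == m

-- the list B's prefix loop builds past the initial 0
def pvPrefs (t : Int) : List String → List Int
  | [] => []
  | w :: ws => (t + PySem.Str.len w + 1) :: pvPrefs (t + PySem.Str.len w + 1) ws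

-- weighted length of the first k words
def pvW (words : List String) (k : Nat) : Int :=
  ((words.take k).map (fun w => PySem.Str.len w + 1)).sum

lemma pvAInner_eq (words : List String) (msg : String) (i : Int) (js : List Int) :
    pvAInner words msg i js =
      if js.any (fun j => pvC words msg i j) then some msg else none := by
  induction js with
  | nil => simp [pvAInner]
  | cons j js ih =>
    by_cases h : pvC words msg i j
    · have : PySem.Str.join " " (PySem.List.slice words (some i) (some j)) = msg :=
        by simpa [pvC] using h
      simp [pvAInner, pvC, this]
    · simp only [pvAInner, List.any_cons]
      rw [if_neg (by simpa [pvC] using h), ih]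
      simp [h]

lemma pvAOuter_eq (words : List String) (msg : String) (is : List Int) :
    pvAOuter words msg is =
      if is.any (fun i => (PySem.List.pyRange (i + 10) (min (i + 13) (words.length : Int) + 1) 1).any
          (fun j => pvC words msg i j)) then some msg else none := by
  induction is with
  | nil => simp [pvAOuter]
  | cons i is ih =>
    rcases Bool.dichotomy ((PySem.List.pyRange (i + 10) (min (i + 13) (words.length : Int) + 1) 1).any
        (fun j => pvC words msg i j)) with h | h
    · rw [List.any_cons, h, Bool.false_or, ← ih]
      simp only [pvAOuter, pvAInner_eq, h]
      simp
    · rw [List.any_cons, h, Bool.true_or]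
      simp only [pvAOuter, pvAInner_eq, h]
      simp

lemma pvBScan_eq (words : List String) (target : String) (pre : List Int) (m L : Int) (ss : List Int) :
    pvBScan words target pre m L ss =
      if ss.any (fun s => pvP pre m s L && pvC words target s (s + L)) then some target else none := by
  induction ss with
  | nil => simp [pvBScan]
  | cons s ss ih =>
    simp only [pvBScan, List.any_cons, ih]
    by_cases h : (pvP pre m s L && pvC words target s (s + L)) = true
    · rw [if_pos (by simpa [pvP, pvC] using h)]; simp [h]
    · rw [if_neg (by simpa [pvP, pvC] using h)]; simp [h]

lemma pvBLen_eq (words : List String) (target : String) (pre : List Int) (m : Int) (Ls : List Int) :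
    pvBLen words target pre m Ls =
      if Ls.any (fun L => (PySem.List.pyRange 0 ((words.length : Int) - L + 1) 1).any
          (fun s => pvP pre m s L && pvC words target s (s + L))) then some target else none := by
  induction Ls with
  | nil => simp [pvBLen]
  | cons L Ls ih =>
    rcases Bool.dichotomy ((PySem.List.pyRange 0 ((words.length : Int) - L + 1) 1).any
        (fun s => pvP pre m s L && pvC words target s (s + L))) with h | h
    · rw [List.any_cons, h, Bool.false_or, ← ih]
      simp only [pvBLen, pvBScan_eq, h]
      simp
    · rw [List.any_cons, h, Bool.true_or]
      simp only [pvBLen, pvBScan_eq, h]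
      simp

lemma pvFold_eq (l : List String) : ∀ (t : Int) (acc : List Int),
    l.foldl (fun (p : Int × List Int) w => (p.1 + PySem.Str.len w + 1, p.2 ++ [p.1 + PySem.Str.len w + 1])) (t, acc)
      = (t + (l.map (fun w => PySem.Str.len w + 1)).sum, acc ++ pvPrefs t l) := by
  induction l with
  | nil => intro t acc; simp [pvPrefs]
  | cons w ws ih =>
    intro t acc
    simp only [List.foldl_cons, ih, pvPrefs, List.map_cons, List.sum_cons, Prod.mk.injEq]
    constructor
    · ring
    · simp

lemma pvPrefs_get (l : List String) : ∀ (t : Int) (k : Nat), k < l.length →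
    (pvPrefs t l)[k]? = some (t + pvW l (k + 1)) := by
  induction l with
  | nil => intro t k hk; simp at hk
  | cons w ws ih =>
    intro t k hk
    cases k with
    | zero => simp [pvPrefs, pvW]; omega
    | succ k =>
      simp only [pvPrefs, List.getElem?_cons_succ]
      rw [ih _ k (by simpa using hk)]
      simp only [pvW, List.take_succ_cons, List.map_cons, List.sum_cons]
      congr 1; ring

lemma pvPre_get (words : List String) (k : Nat) (hk : k ≤ words.length) :
    (0 :: pvPrefs 0 words)[k]? = some (pvW words k) := by
  cases k with
  | zero => simp [pvW]
  | succ k =>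
    simp only [List.getElem?_cons_succ]
    rw [pvPrefs_get words 0 k (by omega)]
    simp

lemma pvJoinLen : ∀ ws : List String, ws ≠ [] →
    PySem.Str.len (PySem.Str.join " " ws) = (ws.map (fun w => PySem.Str.len w + 1)).sum - 1 := by
  intro ws
  induction ws with
  | nil => intro h; exact absurd rfl h
  | cons w ws ih =>
    intro _
    cases ws with
    | nil =>
      simp only [PySem.Str.len, PySem.Str.join, String.toList_ofList, List.map_cons, List.map_nil,
        PySem.Chars.join_singleton, List.sum_cons, List.sum_nil]
      omega
    | cons v vs =>
      have hlen := ih (by simp)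
      simp only [PySem.Str.len, PySem.Str.join, String.toList_ofList, List.map_cons] at hlen ⊢
      rw [PySem.Chars.join_cons_cons]
      simp only [List.length_append, List.sum_cons]
      have hsep : (" " : String).toList.length = 1 := rfl
      rw [hsep]
      push_cast
      push_cast at hlen
      simp only [List.sum_cons] at hlen
      linarith

lemma pvP_of_C (words : List String) (msg : String) (s L : Int)
    (hs : 0 ≤ s) (hL : 10 ≤ L) (hn : s + L ≤ (words.length : Int))
    (hC : pvC words msg s (s + L) = true) :
    pvP (0 :: pvPrefs 0 words) (PySem.Str.len msg) s L = true := by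
  obtain ⟨a, rfl⟩ : ∃ a : Nat, s = (a : Int) := ⟨s.toNat, by omega⟩
  obtain ⟨b, rfl⟩ : ∃ b : Nat, L = (b : Int) := ⟨L.toNat, by omega⟩
  have hle : a + b ≤ words.length := by omega
  have hb10 : 10 ≤ b := by omega
  have hcast : (a : Int) + (b : Int) = ((a + b : Nat) : Int) := by push_cast; ring
  have hslice : PySem.List.slice words (some (a : Int)) (some ((a : Int) + (b : Int)))
      = (words.drop a).take b := PySem.List.slice_natCast_add words a b
  have hjoin : PySem.Str.join " " ((words.drop a).take b) = msg := by
    rw [pvC] at hC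
    have h2 := (beq_iff_eq).mp hC
    rwa [hslice] at h2
  have hwsne : (words.drop a).take b ≠ [] := by
    intro h
    have := congrArg List.length h
    simp only [List.length_take, List.length_drop, List.length_nil] at this
    omega
  have hlenmsg : PySem.Str.len msg
      = (((words.drop a).take b).map (fun w => PySem.Str.len w + 1)).sum - 1 := by
    rw [← hjoin]; exact pvJoinLen _ hwsne
  have hsum : pvW words (a + b) - pvW words a
      = (((words.drop a).take b).map (fun w => PySem.Str.len w + 1)).sum := by
    simp only [pvW]
    rw [List.take_add]
    simp
  rw [pvP, hcast, PySem.List.pyGet?_natCast, PySem.List.pyGet?_natCast,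
      pvPre_get words _ hle, pvPre_get words _ (by omega)]
  simp only [Option.getD_some]
  rw [beq_iff_eq, hlenmsg, ← hsum]

lemma pvAny_eq (words : List String) (msg : String) :
    ((PySem.List.pyRange 0 (words.length : Int) 1).any (fun i =>
        (PySem.List.pyRange (i + 10) (min (i + 13) (words.length : Int) + 1) 1).any
          (fun j => pvC words msg i j)))
    = ((PySem.List.pyRange 10 14 1).any (fun L =>
        (PySem.List.pyRange 0 ((words.length : Int) - L + 1) 1).any
          (fun s => pvP (0 :: pvPrefs 0 words) (PySem.Str.len msg) s L && pvC words msg s (s + L)))) := by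
  rw [Bool.eq_iff_iff]
  simp only [List.any_eq_true, PySem.List.mem_pyRange_one, Bool.and_eq_true]
  constructor
  · rintro ⟨i, ⟨hi0, hin⟩, j, ⟨hj1, hj2⟩, hC⟩
    refine ⟨j - i, by omega, i, by omega, ?_, ?_⟩
    · exact pvP_of_C words msg i (j - i) hi0 (by omega) (by omega)
        (by rw [show i + (j - i) = j by ring]; exact hC)
    · rw [show i + (j - i) = j by ring]; exact hC
  · rintro ⟨L, ⟨hL1, hL2⟩, s, ⟨hs0, hs1⟩, _, hC⟩
    exact ⟨s, ⟨hs0, by omega⟩, s + L, ⟨by omega, by omega⟩, hC⟩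

-- ===== VERDICT (by name: the statement is the Claim_ definition above) =====
theorem find_matching_text_spec : Claim_equal_find_matching_text := by
  intro reference_text decoded_message _
  simp only [Spec_find_matching_text, find_matching_text, find_matching_text_alt]
  rw [pvFold_eq]
  simp only [List.singleton_append]
  rw [pvAOuter_eq, pvBLen_eq, pvAny_eq]
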